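-- pv_equiv track=rewrite | github.com/youmeizhang/Google-Code-Jam | 2017 Round 1A/Alphabet Cake.py | fillCake
-- ===== SOURCE A (Python) =====
-- def fillCake(karta):
--     row, column = len(karta), len(karta[0])
--     row_list = []
--     for r in range(row):
--         curr = karta[r][0]
--         for c in range(column):
--             if karta[r][c] != "?":
--                 curr = karta[r][c]
--                 for i in range(c):
--                     if karta[r][i] == "?":
--                         karta[r][i] = curr
--
--             else:
--                 karta[r][c] = curr
--
--         if curr == "?":
--             row_list.append(r)
--
--         else:
--             while(row_list):
--                 row_l = row_list.pop()
--                 karta[row_l] = karta[r]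
--
--     while(row_list):
--         row_l = row_list.pop()
--         replace_l = row_l
--
--         while(karta[replace_l][0] == "?"):
--             replace_l -= 1
--
--         karta[row_l] = karta[replace_l]
--
--     return karta
-- ===== SOURCE B (Python) =====
-- def fillCake(karta):
--     # Staged symmetric sweeps: combine nearest-letter-at-or-left with
--     # nearest-letter-at-or-right per row, then nearest-lettered-row-below
--     # with nearest-lettered-row-above for the all-'?' rows.
--     def nearest_before(cells):
--         out, last = [], "?"
--         for c in cells:
--             if c != "?":
--                 last = c
--             out.append(last)
--         return out
--
--     filled = []
--     for row in karta:
--         left = nearest_before(row)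
--         right = nearest_before(row[::-1])[::-1]
--         filled.append([l if l != "?" else r for l, r in zip(left, right)])
--
--     def nearest_row_before(rows, last=None):
--         out = []
--         for fr in rows:
--             if fr[0] != "?":
--                 last = fr
--             out.append(last)
--         return out
--
--     below = nearest_row_before(filled[::-1])[::-1]
--     above = nearest_row_before(filled)
--     res = []
--     for fr, b, a in zip(filled, below, above):
--         if fr[0] != "?":
--             res.append(fr)
--         elif b is not None:
--             res.append(b)
--         elif a is not None:
--             res.append(a)
--         else:
--             res.append(fr)
--     return res
-- ===== Notes on version B (the rewrite author's own statement) =====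
-- stated objective: faster
-- what changed: B replaces A's in-place pass (nested prefix backfill at every letter, a pending list of all-'?' rows patched on flush, and upward pop-and-scan loops) by four independent linear sweeps: per row it combines a nearest-letter-at-or-left scan with a nearest-letter-at-or-right scan, and for all-'?' rows it combines a nearest-lettered-row-below scan with a nearest-lettered-row-above scan.
-- outside the precondition, e.g. on fillCake([['a'], ['?', 'b']]): A returns [['a'], ['a']], B returns [['a'], ['b', 'b']]; on fillCake([['?']]): A raises IndexError, B returns [['?']]
import Mathlib
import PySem

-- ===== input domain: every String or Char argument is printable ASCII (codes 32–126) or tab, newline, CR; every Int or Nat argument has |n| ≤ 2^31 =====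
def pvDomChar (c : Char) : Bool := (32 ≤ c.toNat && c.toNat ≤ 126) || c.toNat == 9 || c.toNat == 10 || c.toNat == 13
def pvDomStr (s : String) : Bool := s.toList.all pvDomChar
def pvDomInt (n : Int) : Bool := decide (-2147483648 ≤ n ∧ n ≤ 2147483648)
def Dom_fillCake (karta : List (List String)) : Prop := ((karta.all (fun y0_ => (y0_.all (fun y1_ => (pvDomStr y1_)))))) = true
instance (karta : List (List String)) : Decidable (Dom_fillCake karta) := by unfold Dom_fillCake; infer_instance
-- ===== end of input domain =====

-- B replaces A's in-place pass (nested prefix backfill, pending list, upward scans) by four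
-- independent linear sweeps (nearest letter left/right per row, nearest lettered row below/above).
-- Python A mutates `karta` in place; B does not — the equivalence proved here is about the RETURN value.

-- ===== PORT A =====
-- inner loop: for i in range(c): if karta[r][i] == "?": karta[r][i] = curr
def fillA_back (rw : List String) (curr : String) (c : Nat) : List String :=
  (List.range c).foldl (fun rw i => if rw.getD i "" = "?" then rw.set i curr else rw) rw

-- one row of the main loop; getD is exact under Pre_ (rectangular grid, nonempty rows)
def fillA_row (row0 : List String) (column : Nat) : List String × String :=
  (List.range column).foldl
    (fun st c =>
      if st.1.getD c "" ≠ "?" then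
        (fillA_back st.1 (st.1.getD c "") c, st.1.getD c "")
      else
        (st.1.set c st.2, st.2))
    (row0, row0.getD 0 "?")

-- while karta[replace_l][0] == "?": replace_l -= 1   (negative indices wrap as in Python;
-- fuel only makes the recursion total — under Pre_ the loop stops well within it)
def scanUpA (g : List (List String)) : Nat → Int → Int
  | 0, l => l
  | fuel+1, l =>
    if ((PySem.List.pyGet? g l).getD []).getD 0 "?" = "?" then scanUpA g fuel (l - 1) else l

def fillCake (karta : List (List String)) : List (List String) :=
  let row := karta.length
  let column := (karta.headD []).length
  let st := (List.range row).foldl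
    (fun (st : List (List String) × List Nat) r =>
      let pr := fillA_row (st.1.getD r []) column
      let g := st.1.set r pr.1
      if pr.2 = "?" then (g, st.2 ++ [r])
      else (st.2.reverse.foldl (fun g l => g.set l pr.1) g, []))  -- while row_list: pop; karta[row_l] = karta[r]
    (karta, [])
  st.2.reverse.foldl                                              -- while row_list: pop; scan upwards; copy
    (fun g row_l =>
      g.set row_l ((PySem.List.pyGet? g (scanUpA g (2 * g.length + 2) (row_l : Int))).getD []))
    st.1

-- ===== PORT B =====
-- one sweep: nearest non-'?' at or before each position ('?' where none)
def nearestBefore (cells : List String) : List String :=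
  (cells.foldl (fun (st : List String × String) c =>
      if c ≠ "?" then (st.1 ++ [c], c) else (st.1 ++ [st.2], st.2)) ([], "?")).1

-- row[::-1] is ported as List.reverse (exact)
def fillRowB (row : List String) : List String :=
  let left := nearestBefore row
  let right := (nearestBefore row.reverse).reverse
  (left.zip right).map (fun lr => if lr.1 ≠ "?" then lr.1 else lr.2)

-- nearest lettered row at or before each position; fr[0] is read as getD 0 "" (exact under
-- Pre_, which guarantees nonempty rows)
def nearestRowBefore (rows : List (List String)) : List (Option (List String)) :=
  (rows.foldl (fun (st : List (Option (List String)) × Option (List String)) fr =>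
      if fr.getD 0 "" ≠ "?" then (st.1 ++ [some fr], some fr) else (st.1 ++ [st.2], st.2))
    ([], none)).1

def fillCake_alt (karta : List (List String)) : List (List String) :=
  let filled := karta.map fillRowB
  let below := (nearestRowBefore filled.reverse).reverse
  let above := nearestRowBefore filled
  ((filled.zip below).zip above).map (fun t =>
    if t.1.1.getD 0 "" ≠ "?" then t.1.1
    else match t.1.2 with
      | some b => b
      | none => match t.2 with
        | some a => a
        | none => t.1.1)

-- ===== PRECONDITION & SPEC =====
-- Pre_ excludes inputs where A raises IndexError (empty grid, empty first row, a row shorter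
-- than the first, an all-'?' first-row-width grid) and ragged grids with rows longer than the
-- first, on which A's value (only the first-row-width prefix filled) is an artefact of reading
-- len(karta[0]) once.
def Pre_fillCake (karta : List (List String)) : Prop :=
  karta ≠ [] ∧ 0 < (karta.headD []).length ∧
  (∀ ro ∈ karta, ro.length = (karta.headD []).length) ∧
  ∃ ro ∈ karta, ∃ s ∈ ro, s ≠ "?"
instance (karta : List (List String)) : Decidable (Pre_fillCake karta) := by unfold Pre_fillCake; infer_instance

def pvWitness_fillCake : List (List String) := [["?", "?"], ["a", "?"], ["?", "?"]]

def Spec_fillCake (karta : List (List String)) (out : List (List String)) : Prop := out = fillCake_alt karta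
instance (karta : List (List String)) (out : List (List String)) : Decidable (Spec_fillCake karta out) := by unfold Spec_fillCake; infer_instance

-- ===== CLAIM (what is proved, stated in full; the proofs are below) =====
def Claim_equal_fillCake : Prop := ∀ (karta : List (List String)), Dom_fillCake karta → Pre_fillCake karta → Spec_fillCake karta (fillCake karta)


-- ===== LEMMAS AND PROOFS =====

-- proof-only intermediate: the pending-list formulation (one left-to-right pass per row plus a
-- pending list of all-'?' rows); A is proved equal to it by a fold invariant, and B's sweeps
-- are proved equal to it by scan characterizations.

def fillB_row (row : List String) : List String × Option String :=
  row.foldl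
    (fun (st : List String × Option String) cell =>
      if cell ≠ "?" then
        match st.2 with
        | none => (List.replicate st.1.length cell ++ [cell], some cell)
        | some _ => (st.1 ++ [cell], some cell)
      else
        (st.1 ++ [st.2.getD cell], st.2))
    ([], none)

def BstepG (st : List (List String) × List Nat × Option (List String)) (row : List String) :
    List (List String) × List Nat × Option (List String) :=
  let pr := fillB_row row
  match pr.2 with
  | none => (st.1 ++ [pr.1], st.2.1 ++ [st.1.length], st.2.2)
  | some _ => ((st.2.1.foldl (fun f i => f.set i pr.1) st.1) ++ [pr.1], [], some pr.1)

def refFill (karta : List (List String)) : List (List String) :=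
  let st := karta.foldl BstepG ([], [], none)
  match st.2.2 with
  | none => st.1
  | some p => st.2.1.foldl (fun f i => f.set i p) st.1

-- generic helpers about List.set / foldl of set

lemma foldl_set_comm {α : Type} (ls : List Nat) (v : α) (j : Nat) (g : List α) :
    ls.foldl (fun g l => g.set l v) (g.set j v) = (ls.foldl (fun g l => g.set l v) g).set j v := by
  induction ls generalizing g with
  | nil => rfl
  | cons i ls ih =>
    simp only [List.foldl_cons]
    rw [← ih]
    congr 1
    by_cases hij : i = j
    · subst hij; simp [List.set_set]
    · rw [List.set_comm _ _ (Ne.symm hij)]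

lemma foldl_set_reverse {α : Type} (ls : List Nat) (v : α) (g : List α) :
    ls.reverse.foldl (fun g l => g.set l v) g = ls.foldl (fun g l => g.set l v) g := by
  induction ls generalizing g with
  | nil => rfl
  | cons i ls ih =>
    simp only [List.reverse_cons, List.foldl_append, List.foldl_cons, List.foldl_nil, ih]
    rw [← foldl_set_comm]

lemma foldl_set_append {α : Type} (ls : List Nat) (v : α) (X Y : List α)
    (h : ∀ i ∈ ls, i < X.length) :
    ls.foldl (fun g l => g.set l v) (X ++ Y) = (ls.foldl (fun g l => g.set l v) X) ++ Y := by
  induction ls generalizing X with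
  | nil => rfl
  | cons i ls ih =>
    simp only [List.foldl_cons]
    rw [List.set_append, if_pos (h i (List.mem_cons_self))]
    exact ih _ (fun j hj => by rw [List.length_set]; exact h j (List.mem_cons_of_mem _ hj))

lemma length_foldl_set {α : Type} (ls : List Nat) (v : α) (X : List α) :
    (ls.foldl (fun g l => g.set l v) X).length = X.length := by
  induction ls generalizing X with
  | nil => rfl
  | cons i ls ih => simp only [List.foldl_cons]; rw [ih, List.length_set]

lemma set_append_at {α : Type} (X : List α) (y : α) (Y : List α) (v : α) :
    (X ++ y :: Y).set X.length v = X ++ v :: Y := by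
  rw [List.set_append, if_neg (by omega)]
  simp

-- row-level: B's one-pass fill

lemma fillB_row_snoc (Q : List String) (a : String) :
    fillB_row (Q ++ [a]) =
      (if a ≠ "?" then
        match (fillB_row Q).2 with
        | none => (List.replicate (fillB_row Q).1.length a ++ [a], some a)
        | some _ => ((fillB_row Q).1 ++ [a], some a)
      else ((fillB_row Q).1 ++ [(fillB_row Q).2.getD a], (fillB_row Q).2)) := by
  simp only [fillB_row, List.foldl_append, List.foldl_cons, List.foldl_nil]

lemma rowB_basic (Q : List String) :
    (fillB_row Q).1.length = Q.length ∧
    (match (fillB_row Q).2 with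
     | none => (fillB_row Q).1 = Q ∧ ∀ s ∈ Q, s = "?"
     | some v => v ≠ "?" ∧ ∀ s ∈ (fillB_row Q).1, s ≠ "?") := by
  induction Q using List.reverseRecOn with
  | nil => exact ⟨rfl, rfl, by simp⟩
  | append_singleton Q a ih =>
    obtain ⟨ihlen, ihm⟩ := ih
    rw [fillB_row_snoc]
    by_cases ha : a = "?"
    · subst ha
      rw [if_neg (by simp)]
      rcases h2 : (fillB_row Q).2 with _ | v
      · rw [h2] at ihm
        obtain ⟨he, hall⟩ := ihm
        refine ⟨by simp [ihlen], ?_⟩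
        constructor
        · simp [he]
        · intro s hs
          rcases List.mem_append.mp hs with h | h
          · exact hall s h
          · simpa using h
      · rw [h2] at ihm
        refine ⟨by simp [ihlen], ?_⟩
        refine ⟨ihm.1, ?_⟩
        intro s hs
        rcases List.mem_append.mp hs with h | h
        · exact ihm.2 s h
        · simp only [List.mem_singleton] at h
          simpa [h2, h] using ihm.1
    · rw [if_pos (by simpa using ha)]
      rcases h2 : (fillB_row Q).2 with _ | v
      · rw [h2] at ihm
        refine ⟨by simp [ihlen], ?_⟩
        refine ⟨ha, ?_⟩
        intro s hs
        rcases List.mem_append.mp hs with h | h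
        · rw [List.eq_of_mem_replicate h]; exact ha
        · simp only [List.mem_singleton] at h; rw [h]; exact ha
      · rw [h2] at ihm
        refine ⟨by simp [ihlen], ?_⟩
        refine ⟨ha, ?_⟩
        intro s hs
        rcases List.mem_append.mp hs with h | h
        · exact ihm.2 s h
        · simp only [List.mem_singleton] at h; rw [h]; exact ha

-- row-level: A's fold over indices equals the one-pass fill

lemma back_spec (P rest : List String) (x : String) :
    fillA_back (P ++ rest) x P.length
      = P.map (fun s => if s = "?" then x else s) ++ rest := by
  induction P using List.reverseRecOn generalizing rest with
  | nil => simp [fillA_back]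
  | append_singleton Q a ih =>
    have hlen : (Q ++ [a]).length = Q.length + 1 := by simp
    rw [fillA_back, hlen, List.range_succ, List.foldl_append]
    have h1 : (Q ++ [a]) ++ rest = Q ++ (a :: rest) := by simp
    rw [h1]
    have := ih (a :: rest)
    rw [fillA_back] at this
    rw [this]
    have hmlen : (Q.map (fun s => if s = "?" then x else s)).length = Q.length := by simp
    simp only [List.foldl_cons, List.foldl_nil]
    rw [show (List.map (fun s => if s = "?" then x else s) Q ++ a :: rest).getD Q.length "" = a from by
      rw [List.getD_append_right _ _ _ _ (le_of_eq hmlen)]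
      simp [hmlen]]
    by_cases ha : a = "?"
    · rw [if_pos ha, ← hmlen, set_append_at]
      simp [ha]
    · rw [if_neg ha]
      simp [ha]

lemma rowA_prefix (P rest : List String) :
    (List.range P.length).foldl
      (fun st c =>
        if st.1.getD c "" ≠ "?" then
          (fillA_back st.1 (st.1.getD c "") c, st.1.getD c "")
        else
          (st.1.set c st.2, st.2))
      (P ++ rest, (P ++ rest).getD 0 "?")
    = ((fillB_row P).1 ++ rest, (fillB_row P).2.getD ((P ++ rest).getD 0 "?")) := by
  induction P using List.reverseRecOn generalizing rest with
  | nil => simp [fillB_row]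
  | append_singleton Q a ih =>
    have hBlen : (fillB_row Q).1.length = Q.length := (rowB_basic Q).1
    have hlen : (Q ++ [a]).length = Q.length + 1 := by simp
    rw [hlen, List.range_succ, List.foldl_append]
    have h1 : (Q ++ [a]) ++ rest = Q ++ (a :: rest) := by simp
    rw [h1, ih (a :: rest)]
    simp only [List.foldl_cons, List.foldl_nil]
    have hget : ((fillB_row Q).1 ++ a :: rest).getD Q.length "" = a := by
      rw [List.getD_append_right _ _ _ _ (le_of_eq hBlen)]
      simp [hBlen]
    rw [hget]
    by_cases ha : a = "?"
    · rw [if_neg (by simp [ha])]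
      rcases h2 : (fillB_row Q).2 with _ | v
      · have hall := (rowB_basic Q).2
        rw [h2] at hall
        obtain ⟨hBQ, hQall⟩ := hall
        have hd : (Q ++ a :: rest).getD 0 "?" = "?" := by
          cases Q with
          | nil => simp [ha]
          | cons q Q' => simp [hQall q (by simp)]
        rw [fillB_row_snoc, if_neg (by simp [ha]), h2]
        rw [show ((fillB_row Q).1 ++ a :: rest).set Q.length (Option.getD none ((Q ++ a :: rest).getD 0 "?"))
              = (fillB_row Q).1 ++ (Option.getD none ((Q ++ a :: rest).getD 0 "?")) :: rest from by
          rw [← hBlen, set_append_at]]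
        rw [ha] at hd
        simp only [ha, Option.getD_none, hd]
        simp
      · have hsome := (rowB_basic Q).2
        rw [h2] at hsome
        rw [fillB_row_snoc, if_neg (by simp [ha]), h2]
        rw [show ((fillB_row Q).1 ++ a :: rest).set Q.length (Option.getD (some v) ((Q ++ a :: rest).getD 0 "?"))
              = (fillB_row Q).1 ++ (Option.getD (some v) ((Q ++ a :: rest).getD 0 "?")) :: rest from by
          rw [← hBlen, set_append_at]]
        simp [ha]
    · rw [if_pos (by simp [ha])]
      have hback : fillA_back ((fillB_row Q).1 ++ a :: rest) a Q.length
          = ((fillB_row Q).1.map (fun s => if s = "?" then a else s)) ++ a :: rest := by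
        rw [← hBlen, back_spec]
      rcases h2 : (fillB_row Q).2 with _ | v
      · have hall := (rowB_basic Q).2
        rw [h2] at hall
        obtain ⟨hBQ, hQall⟩ := hall
        have hmap : (fillB_row Q).1.map (fun s => if s = "?" then a else s)
            = List.replicate (fillB_row Q).1.length a := by
          rw [List.eq_replicate_iff]
          refine ⟨by simp, fun b hb => ?_⟩
          obtain ⟨s, hs, rfl⟩ := List.mem_map.mp hb
          rw [hBQ] at hs
          simp [hQall s hs]
        rw [hback, hmap, fillB_row_snoc, if_pos (by simp [ha]), h2]
        simp
      · have hsome := (rowB_basic Q).2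
        rw [h2] at hsome
        have hmap : (fillB_row Q).1.map (fun s => if s = "?" then a else s) = (fillB_row Q).1 := by
          have := List.map_congr_left (fun s hs => by simp [hsome.2 s hs] :
            ∀ s ∈ (fillB_row Q).1, (if s = "?" then a else s) = id s)
          rw [this, List.map_id]
        rw [hback, hmap, fillB_row_snoc, if_pos (by simp [ha]), h2]
        simp

lemma rowA_eq (row : List String) :
    fillA_row row row.length
      = ((fillB_row row).1, (fillB_row row).2.getD (row.getD 0 "?")) := by
  have h := rowA_prefix row []
  simpa [fillA_row] using h

-- grid-level steps (definitionally the bodies of A's port and of refFill)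

def AstepG (column : Nat) (st : List (List String) × List Nat) (r : Nat) :
    List (List String) × List Nat :=
  let pr := fillA_row (st.1.getD r []) column
  let g := st.1.set r pr.1
  if pr.2 = "?" then (g, st.2 ++ [r])
  else (st.2.reverse.foldl (fun g l => g.set l pr.1) g, [])

def finstepG (g : List (List String)) (row_l : Nat) : List (List String) :=
  g.set row_l ((PySem.List.pyGet? g (scanUpA g (2 * g.length + 2) (row_l : Int))).getD [])

lemma fillCake_eq_steps (karta : List (List String)) :
    fillCake karta =
      ((List.range karta.length).foldl (AstepG (karta.headD []).length) (karta, [])).2.reverse.foldl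
        finstepG ((List.range karta.length).foldl (AstepG (karta.headD []).length) (karta, [])).1 := rfl

lemma refFill_eq_steps (karta : List (List String)) :
    refFill karta =
      (match (karta.foldl BstepG ([], [], none)).2.2 with
       | none => (karta.foldl BstepG ([], [], none)).1
       | some p => (karta.foldl BstepG ([], [], none)).2.1.foldl (fun f i => f.set i p)
           (karta.foldl BstepG ([], [], none)).1) := rfl

def InvG (karta : List (List String)) (r : Nat) (A : List (List String) × List Nat)
    (B : List (List String) × List Nat × Option (List String)) : Prop :=
  A.1 = B.1 ++ karta.drop r ∧ A.2 = B.2.1 ∧ B.1.length = r ∧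
  (match B.2.2 with
   | none => B.2.1 = List.range' 0 r ∧ B.1 = karta.take r ∧ ∀ ro ∈ B.1, ∀ s ∈ ro, s = "?"
   | some p => ∃ k, k < r ∧ B.2.1 = List.range' (k+1) (r-(k+1)) ∧
       B.1.getD k [] = p ∧ p ≠ [] ∧ (∀ s ∈ p, s ≠ "?") ∧
       ∀ j, k < j → j < r → B.1.getD j [] ≠ [] ∧ ∀ s ∈ B.1.getD j [], s = "?")

lemma inv_step (karta : List (List String)) (column : Nat)
    (hcol : ∀ ro ∈ karta, ro.length = column) (hc : 0 < column)
    (r : Nat) (hr : r < karta.length)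
    (A : List (List String) × List Nat) (B : List (List String) × List Nat × Option (List String))
    (h : InvG karta r A B) :
    InvG karta (r+1) (AstepG column A r) (BstepG B (karta.getD r [])) := by
  obtain ⟨hA1, hA2, hBlen, hm⟩ := h
  set ro := karta.getD r [] with hro
  have hmem : ro ∈ karta := by
    rw [hro, List.getD_eq_getElem _ _ hr]; exact List.getElem_mem hr
  have hrolen : ro.length = column := hcol ro hmem
  have hrone : ro ≠ [] := by
    intro hnil; rw [hnil] at hrolen; simp at hrolen; omega
  have hdrop : karta.drop r = ro :: karta.drop (r+1) := by
    rw [List.drop_eq_getElem_cons hr, hro, List.getD_eq_getElem _ _ hr]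
  have hgetro : A.1.getD r [] = ro := by
    rw [hA1, List.getD_append_right _ _ _ _ (le_of_eq hBlen), hdrop, hBlen]
    simp
  have hpr : fillA_row (A.1.getD r []) column
      = ((fillB_row ro).1, (fillB_row ro).2.getD (ro.getD 0 "?")) := by
    rw [hgetro, ← hrolen, rowA_eq]
  have hBoutlen : (fillB_row ro).1.length = ro.length := (rowB_basic ro).1
  have hset : A.1.set r (fillB_row ro).1 = B.1 ++ (fillB_row ro).1 :: karta.drop (r+1) := by
    have h0 := set_append_at B.1 ro (karta.drop (r+1)) (fillB_row ro).1
    rw [hBlen] at h0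
    rw [hA1, hdrop, h0]
  rcases h2 : (fillB_row ro).2 with _ | v
  · -- the row contains no letter
    have hall := (rowB_basic ro).2
    rw [h2] at hall
    obtain ⟨hBQ, hallq⟩ := hall
    have hbval : (fillB_row ro).2.getD (ro.getD 0 "?") = "?" := by
      rw [h2, Option.getD_none]
      cases hcc : ro with
      | nil => rfl
      | cons q Q => exact hallq q (by rw [hcc]; simp)
    simp only [AstepG, BstepG, h2]
    rw [hpr, hbval, if_pos rfl, hset, hBQ]
    refine ⟨by simp, by rw [hA2, hBlen], by simp [hBlen], ?_⟩
    rcases h22 : B.2.2 with _ | p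
    · rw [h22] at hm
      obtain ⟨hpend, htake, hques⟩ := hm
      refine ⟨?_, ?_, ?_⟩
      · rw [hpend, hBlen, List.range'_concat]
        simp
      · rw [htake, List.take_add_one, List.getElem?_eq_getElem hr]
        rw [hro, List.getD_eq_getElem _ _ hr]
        simp
      · intro r0 hr0 s hs
        rcases List.mem_append.mp hr0 with h | h
        · rw [htake] at h; exact hques r0 (htake ▸ h) s hs
        · simp only [List.mem_singleton] at h
          exact hallq s (h ▸ hs)
    · rw [h22] at hm
      obtain ⟨k, hk1, hpend, hgk, hpne, hpq, hjj⟩ := hm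
      refine ⟨k, by omega, ?_, ?_, hpne, hpq, ?_⟩
      · rw [hpend, hBlen]
        have harith : r + 1 - (k+1) = (r - (k+1)) + 1 := by omega
        rw [harith, List.range'_concat]
        have : k + 1 + 1 * (r - (k+1)) = r := by omega
        rw [this]
      · rw [List.getD_append _ _ _ k (by omega), hgk]
      · intro j hj1 hj2
        by_cases hjr : j = r
        · subst hjr
          rw [List.getD_append_right _ _ _ _ (le_of_eq hBlen)]
          simp only [hBlen, Nat.sub_self, List.getD_cons_zero]
          exact ⟨hrone, hallq⟩
        · rw [List.getD_append _ _ _ j (by omega)]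
          exact hjj j hj1 (by omega)
  · -- the row contains a letter
    have hsome := (rowB_basic ro).2
    rw [h2] at hsome
    obtain ⟨hvne, hnoq⟩ := hsome
    have hbval : (fillB_row ro).2.getD (ro.getD 0 "?") = v := by rw [h2]; rfl
    have hbound : ∀ i ∈ B.2.1, i < B.1.length := by
      rcases h22 : B.2.2 with _ | p
      · rw [h22] at hm
        intro i hi
        rw [hm.1] at hi
        have := List.mem_range'_1.mp hi
        omega
      · rw [h22] at hm
        obtain ⟨k, hk1, hpend, _⟩ := hm
        intro i hi
        rw [hpend] at hi
        have := List.mem_range'_1.mp hi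
        omega
    simp only [AstepG, BstepG, h2]
    rw [hpr, hbval, if_neg hvne, hA2, foldl_set_reverse, hset,
      foldl_set_append _ _ _ _ hbound]
    refine ⟨by simp, rfl, by simp [length_foldl_set, hBlen], ?_⟩
    refine ⟨r, by omega, by simp, ?_, ?_, hnoq, by omega⟩
    · rw [List.getD_append_right _ _ _ _ (le_of_eq (by rw [length_foldl_set, hBlen]))]
      rw [length_foldl_set, hBlen]
      simp
    · intro hnil
      rw [hnil] at hBoutlen
      simp at hBoutlen
      omega

lemma inv_main (karta : List (List String)) (column : Nat)
    (hcol : ∀ ro ∈ karta, ro.length = column) (hc : 0 < column) :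
    ∀ r, r ≤ karta.length →
      InvG karta r ((List.range r).foldl (AstepG column) (karta, []))
        ((karta.take r).foldl BstepG ([], [], none)) := by
  intro r
  induction r with
  | zero => intro _; exact ⟨by simp, rfl, rfl, rfl, by simp, by simp⟩
  | succ r ih =>
    intro hle
    have hr : r < karta.length := by omega
    rw [List.range_succ, List.foldl_append, List.foldl_cons, List.foldl_nil]
    rw [List.take_add_one, List.getElem?_eq_getElem hr]
    simp only [Option.toList_some, List.foldl_append, List.foldl_cons, List.foldl_nil]
    have := inv_step karta column hcol hc r hr _ _ (ih (by omega))
    rwa [List.getD_eq_getElem _ _ hr] at this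

lemma scan_eq (g : List (List String)) (k : Nat) (m' fuel : Nat)
    (hlen : k + m' < g.length) (hfuel : m' < fuel)
    (hk : (g.getD k []).getD 0 "?" ≠ "?")
    (hj : ∀ j, k < j → j ≤ k + m' → (g.getD j []).getD 0 "?" = "?") :
    scanUpA g fuel ((k + m' : Nat) : Int) = (k : Int) := by
  have hval : ∀ j : Nat, j < g.length → ((PySem.List.pyGet? g (j : Int)).getD []) = g.getD j [] := by
    intro j hjl
    rw [PySem.List.pyGet?_natCast, List.getElem?_eq_getElem hjl, Option.getD_some,
      List.getD_eq_getElem _ _ hjl]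
  induction m' generalizing fuel with
  | zero =>
    cases fuel with
    | zero => omega
    | succ f =>
      simp only [Nat.add_zero] at *
      rw [scanUpA, hval k hlen, if_neg hk]
  | succ m ih =>
    cases fuel with
    | zero => omega
    | succ f =>
      rw [scanUpA, hval (k+(m+1)) hlen, if_pos (hj (k+(m+1)) (by omega) le_rfl)]
      rw [show ((k + (m+1) : Nat) : Int) - 1 = ((k + m : Nat) : Int) from by push_cast; ring]
      exact ih f (by omega) (by omega) (fun j h1 h2 => hj j h1 (by omega))

lemma getD_set_ne {α : Type} (g : List α) (i j : Nat) (v d : α) (h : i ≠ j) :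
    (g.set i v).getD j d = g.getD j d := by
  rw [List.getD_eq_getElem?_getD, List.getElem?_set_ne h, ← List.getD_eq_getElem?_getD]

lemma final_fold (g : List (List String)) (k m : Nat) (p : List String)
    (hk : g.getD k [] = p) (hp : p.getD 0 "?" ≠ "?")
    (hlen : k + m < g.length)
    (hj : ∀ j, k < j → j ≤ k + m → (g.getD j []).getD 0 "?" = "?") :
    (List.range' (k+1) m).reverse.foldl finstepG g
      = (List.range' (k+1) m).foldl (fun f i => f.set i p) g := by
  induction m generalizing g with
  | zero => rfl
  | succ m ih =>
    have h1 : List.range' (k+1) (m+1) = List.range' (k+1) m ++ [k+1+m] := by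
      rw [List.range'_concat]; simp
    have hstep : finstepG g (k+1+m) = g.set (k+1+m) p := by
      rw [finstepG]
      have hsc : scanUpA g (2*g.length+2) ((k+1+m : Nat) : Int) = (k : Int) := by
        rw [show k+1+m = k+(m+1) from by omega]
        exact scan_eq g k (m+1) (2*g.length+2) (by omega) (by omega)
          (by rw [hk]; exact hp) hj
      rw [hsc, PySem.List.pyGet?_natCast,
        List.getElem?_eq_getElem (show k < g.length from by omega), Option.getD_some,
        ← List.getD_eq_getElem _ [] (show k < g.length from by omega), hk]
    rw [h1, List.reverse_append, List.foldl_append, List.foldl_append]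
    simp only [List.reverse_singleton, List.foldl_cons, List.foldl_nil]
    rw [hstep]
    rw [ih (g.set (k+1+m) p)
      (by rw [getD_set_ne _ _ _ _ _ (by omega), hk])
      (by rw [List.length_set]; omega)
      (fun j hj1 hj2 => by
        rw [getD_set_ne _ _ _ _ _ (by omega)]
        exact hj j hj1 (by omega))]
    rw [foldl_set_comm]

-- A equals the pending-list formulation

lemma fillCake_eq_ref (karta : List (List String)) (hpre : Pre_fillCake karta) :
    fillCake karta = refFill karta := by
  obtain ⟨hne, hc, hcol', hex⟩ := hpre
  have hinv := inv_main karta ((karta.headD []).length) hcol' hc karta.length le_rfl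
  rw [List.take_length] at hinv
  obtain ⟨hA1, hA2, hBlen, hm⟩ := hinv
  rw [List.drop_length, List.append_nil] at hA1
  rw [fillCake_eq_steps, refFill_eq_steps]
  rcases h22 : (karta.foldl BstepG ([], [], none)).2.2 with _ | p
  · rw [h22] at hm
    obtain ⟨hpend, htake, hq⟩ := hm
    rw [List.take_length] at htake
    obtain ⟨ro, hro, st, hst, hst'⟩ := hex
    exact absurd (hq ro (by rw [htake]; exact hro) st hst) hst'
  · rw [h22] at hm
    obtain ⟨k, hk1, hpend, hgk, hpne, hpq, hjj⟩ := hm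
    rw [hA2, hA1, hpend]
    have hp0 : p.getD 0 "?" ≠ "?" := by
      have hl : 0 < p.length := List.length_pos_iff.mpr hpne
      rw [List.getD_eq_getElem _ _ hl]
      exact hpq _ (List.getElem_mem hl)
    refine final_fold _ k (karta.length - (k+1)) p hgk hp0 (by omega) ?_
    intro j hj1 hj2
    obtain ⟨hne', hall⟩ := hjj j hj1 (by omega)
    have hl : 0 < ((karta.foldl BstepG ([], [], none)).1.getD j []).length :=
      List.length_pos_iff.mpr hne'
    rw [List.getD_eq_getElem _ _ hl]
    exact hall _ (List.getElem_mem hl)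

-- ===== scan characterizations for B's sweeps =====

def NBs : List String → String → List String
  | [], _ => []
  | c :: t, last => if c ≠ "?" then c :: NBs t c else last :: NBs t last

def lastL (l : List String) (last : String) : String :=
  l.foldl (fun acc c => if c ≠ "?" then c else acc) last

lemma NBs_length (l : List String) (last : String) : (NBs l last).length = l.length := by
  induction l generalizing last with
  | nil => rfl
  | cons c t ih => by_cases h : c = "?" <;> simp [NBs, h, ih]

lemma nb_fold (l : List String) (acc : List String) (last : String) :
    l.foldl (fun (st : List String × String) c =>
      if c ≠ "?" then (st.1 ++ [c], c) else (st.1 ++ [st.2], st.2)) (acc, last)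
    = (acc ++ NBs l last, lastL l last) := by
  induction l generalizing acc last with
  | nil => simp [NBs, lastL]
  | cons c t ih =>
    by_cases h : c = "?"
    · simp only [List.foldl_cons, lastL, List.foldl_cons, NBs]
      rw [if_neg (by simp [h]), ih]
      simp [h, lastL, ite_not]
    · simp only [List.foldl_cons, lastL, List.foldl_cons, NBs]
      rw [if_pos (by simp [h]), ih]
      simp [h, lastL, ite_not]

lemma nearestBefore_eq (l : List String) : nearestBefore l = NBs l "?" := by
  rw [nearestBefore, nb_fold]
  simp

lemma NBs_append (X Y : List String) (last : String) :
    NBs (X ++ Y) last = NBs X last ++ NBs Y (lastL X last) := by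
  induction X generalizing last with
  | nil => simp [NBs, lastL]
  | cons c t ih =>
    by_cases h : c = "?" <;>
      simp [NBs, h, ih, lastL, List.foldl_cons]

lemma NBs_allq (P : List String) (h : ∀ s ∈ P, s = "?") (last : String) :
    NBs P last = List.replicate P.length last := by
  induction P with
  | nil => rfl
  | cons c t ih =>
    have hc : c = "?" := h c (by simp)
    simp [NBs, hc, ih (fun s hs => h s (by simp [hs])), List.replicate_succ]

lemma lastL_allq (P : List String) (h : ∀ s ∈ P, s = "?") (last : String) :
    lastL P last = last := by
  induction P generalizing last with
  | nil => rfl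
  | cons c t ih =>
    have hc : c = "?" := h c (by simp)
    simp only [lastL, List.foldl_cons, hc]
    rw [if_neg (by simp)]
    exact ih (fun s hs => h s (by simp [hs])) last

lemma allq_eq_replicate (P : List String) (h : ∀ s ∈ P, s = "?") :
    P = List.replicate P.length "?" :=
  List.eq_replicate_iff.mpr ⟨rfl, h⟩

lemma NBs_lettered (l : List String) (last : String) (h : last ≠ "?") :
    ∀ s ∈ NBs l last, s ≠ "?" := by
  induction l generalizing last with
  | nil => simp [NBs]
  | cons c t ih =>
    intro s hs
    by_cases hc : c = "?"
    · rw [NBs, if_neg (by simp [hc])] at hs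
      rcases List.mem_cons.mp hs with h1 | h1
      · rw [h1]; exact h
      · exact ih last h s h1
    · rw [NBs, if_pos hc] at hs
      rcases List.mem_cons.mp hs with h1 | h1
      · rw [h1]; exact hc
      · exact ih c hc s h1

-- fillB_row's fold in terms of NBs

lemma fb_fold_some (l : List String) (acc : List String) (c : String) :
    l.foldl
      (fun (st : List String × Option String) cell =>
        if cell ≠ "?" then
          match st.2 with
          | none => (List.replicate st.1.length cell ++ [cell], some cell)
          | some _ => (st.1 ++ [cell], some cell)
        else
          (st.1 ++ [st.2.getD cell], st.2))
      (acc, some c)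
    = (acc ++ NBs l c, some (lastL l c)) := by
  induction l generalizing acc c with
  | nil => simp [NBs, lastL]
  | cons cell t ih =>
    by_cases h : cell = "?"
    · simp only [List.foldl_cons, NBs, lastL]
      rw [if_neg (by simp [h]), ih]
      simp [h, lastL, ite_not]
    · simp only [List.foldl_cons, NBs, lastL]
      rw [if_pos (by simp [h]), ih]
      simp [h, lastL, ite_not]

lemma fb_fold_none_allq (P : List String) (acc : List String) (h : ∀ s ∈ P, s = "?") :
    P.foldl
      (fun (st : List String × Option String) cell =>
        if cell ≠ "?" then
          match st.2 with
          | none => (List.replicate st.1.length cell ++ [cell], some cell)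
          | some _ => (st.1 ++ [cell], some cell)
        else
          (st.1 ++ [st.2.getD cell], st.2))
      (acc, none)
    = (acc ++ P, none) := by
  induction P generalizing acc with
  | nil => simp
  | cons c t ih =>
    have hc : c = "?" := h c (by simp)
    simp only [List.foldl_cons]
    rw [if_neg (by simp [hc]), ih _ (fun s hs => h s (by simp [hs]))]
    simp [hc]

lemma fillB_allq (P : List String) (h : ∀ s ∈ P, s = "?") :
    fillB_row P = (P, none) := by
  rw [fillB_row, fb_fold_none_allq P [] h]
  simp

lemma fillB_decomp (P : List String) (a : String) (t : List String)
    (hP : ∀ s ∈ P, s = "?") (ha : a ≠ "?") :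
    fillB_row (P ++ a :: t) = (List.replicate P.length a ++ a :: NBs t a, some (lastL t a)) := by
  rw [fillB_row, List.foldl_append]
  rw [fb_fold_none_allq P [] hP]
  simp only [List.nil_append, List.foldl_cons]
  rw [if_pos (by simp [ha])]
  rw [fb_fold_some]
  simp

lemma row_decomp (row : List String) :
    (∀ s ∈ row, s = "?") ∨
      ∃ P a t, row = P ++ a :: t ∧ (∀ s ∈ P, s = "?") ∧ a ≠ "?" := by
  induction row with
  | nil => left; simp
  | cons c t ih =>
    by_cases hc : c = "?"
    · rcases ih with h | ⟨P, a, t', rfl, hP, ha⟩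
      · left; intro s hs
        rcases List.mem_cons.mp hs with h1 | h1
        · rw [h1]; exact hc
        · exact h s h1
      · right
        exact ⟨c :: P, a, t', by simp, fun s hs => by
          rcases List.mem_cons.mp hs with h1 | h1
          · rw [h1]; exact hc
          · exact hP s h1, ha⟩
    · right
      exact ⟨[], c, t, by simp, by simp, hc⟩

-- zip/map computations

lemma zip_append_eq {α β : Type} (X1 : List α) (Y1 : List β) (X2 : List α) (Y2 : List β)
    (h : X1.length = Y1.length) :
    (X1 ++ X2).zip (Y1 ++ Y2) = X1.zip Y1 ++ X2.zip Y2 := by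
  induction X1 generalizing Y1 with
  | nil => cases Y1 with
    | nil => simp
    | cons d Y1' => simp at h
  | cons c X1' ih =>
    cases Y1 with
    | nil => simp at h
    | cons d Y1' =>
      simp only [List.cons_append, List.zip_cons_cons]
      rw [ih Y1' (by simpa using h)]

lemma zipmap_letters (l r : List String) (h : ∀ s ∈ l, s ≠ "?") (hlen : l.length = r.length) :
    (l.zip r).map (fun lr => if lr.1 ≠ "?" then lr.1 else lr.2) = l := by
  induction l generalizing r with
  | nil => simp
  | cons c t ih =>
    cases r with
    | nil => simp at hlen
    | cons d r' =>
      simp only [List.zip_cons_cons, List.map_cons]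
      rw [if_pos (by simp [h c (by simp)])]
      rw [ih r' (fun s hs => h s (by simp [hs])) (by simpa using hlen)]

lemma zipmap_rep_q (n : Nat) (r : List String) (hlen : n = r.length) :
    ((List.replicate n "?").zip r).map (fun lr => if lr.1 ≠ "?" then lr.1 else lr.2) = r := by
  induction r generalizing n with
  | nil => simp [hlen]
  | cons d r' ih =>
    cases n with
    | zero => simp at hlen
    | succ m =>
      simp only [List.replicate_succ, List.zip_cons_cons, List.map_cons]
      rw [if_neg (by simp)]
      rw [ih m (by simpa using hlen)]

-- B's per-row sweeps equal the one-pass row fill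

lemma fillRowB_eq (row : List String) : fillRowB row = (fillB_row row).1 := by
  rcases row_decomp row with hq | ⟨P, a, t, hrow, hP, ha⟩
  · rw [fillB_allq row hq]
    rw [fillRowB]
    simp only
    rw [nearestBefore_eq, nearestBefore_eq, NBs_allq row hq,
      NBs_allq row.reverse (fun s hs => hq s (List.mem_reverse.mp hs))]
    rw [List.length_reverse, List.reverse_replicate]
    rw [zipmap_rep_q row.length (List.replicate row.length "?") (by simp)]
    exact (allq_eq_replicate row hq).symm
  · subst hrow
    rw [fillB_decomp P a t hP ha]
    rw [fillRowB]
    simp only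
    rw [nearestBefore_eq, nearestBefore_eq]
    rw [NBs_append, NBs_allq P hP, lastL_allq P hP]
    have hrev : (P ++ a :: t).reverse = (t.reverse ++ [a]) ++ P.reverse := by simp
    rw [hrev, NBs_append, NBs_allq P.reverse (fun s hs => hP s (List.mem_reverse.mp hs))]
    have hlastA : lastL (t.reverse ++ [a]) "?" = a := by
      rw [lastL, List.foldl_append]
      simp [ha]
    rw [hlastA, List.length_reverse, List.reverse_append, List.reverse_replicate]
    have hNa : NBs (a :: t) "?" = a :: NBs t a := by
      rw [NBs, if_pos ha]
    rw [hNa]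
    rw [zip_append_eq _ _ _ _ (by simp), List.map_append]
    rw [zipmap_rep_q P.length (List.replicate P.length a) (by simp)]
    rw [zipmap_letters (a :: NBs t a) ((NBs (t.reverse ++ [a]) "?").reverse)
      (by
        intro s hs
        rcases List.mem_cons.mp hs with h1 | h1
        · rw [h1]; exact ha
        · exact NBs_lettered t a ha s h1)
      (by simp [NBs_length])]

-- row sweeps for the grid stage

def firstSrcF : List (List String) → Option (List String) → Option (List String)
  | [], prev => prev
  | h :: t, prev => if h.getD 0 "" ≠ "?" then some h else firstSrcF t prev

def gridResF : List (List String) → Option (List String) → List (List String)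
  | [], _ => []
  | h :: t, prev =>
    if h.getD 0 "" ≠ "?" then h :: gridResF t (some h)
    else (match firstSrcF t prev with | some p => p | none => h) :: gridResF t prev

def NBRs : List (List String) → Option (List String) → List (Option (List String))
  | [], _ => []
  | h :: t, last =>
    (if h.getD 0 "" ≠ "?" then some h else last)
      :: NBRs t (if h.getD 0 "" ≠ "?" then some h else last)

def lastR (l : List (List String)) (last : Option (List String)) : Option (List String) :=
  l.foldl (fun acc h => if h.getD 0 "" ≠ "?" then some h else acc) last

lemma nbr_fold (l : List (List String)) (acc : List (Option (List String)))
    (last : Option (List String)) :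
    l.foldl (fun (st : List (Option (List String)) × Option (List String)) fr =>
      if fr.getD 0 "" ≠ "?" then (st.1 ++ [some fr], some fr) else (st.1 ++ [st.2], st.2))
      (acc, last)
    = (acc ++ NBRs l last, lastR l last) := by
  induction l generalizing acc last with
  | nil => simp [NBRs, lastR]
  | cons h t ih =>
    by_cases hl : h.getD 0 "" = "?"
    · have hl' : (h.getD 0 "" ≠ "?") = False := by
        simp only [ne_eq]; exact eq_false (not_not_intro hl)
      simp only [List.foldl_cons, hl', if_false]
      rw [ih]
      simp only [NBRs, lastR, List.foldl_cons, hl', if_false]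
      simp
    · have hl' : (h.getD 0 "" ≠ "?") = True := by
        simp only [ne_eq]; exact eq_true hl
      simp only [List.foldl_cons, hl', if_true]
      rw [ih]
      simp only [NBRs, lastR, List.foldl_cons, hl', if_true]
      simp

lemma nearestRowBefore_eq (l : List (List String)) : nearestRowBefore l = NBRs l none := by
  rw [nearestRowBefore, nbr_fold]
  simp

lemma NBRs_append (X Y : List (List String)) (last : Option (List String)) :
    NBRs (X ++ Y) last = NBRs X last ++ NBRs Y (lastR X last) := by
  induction X generalizing last with
  | nil => simp [NBRs, lastR]
  | cons h t ih =>
    by_cases hl : h.getD 0 "" = "?"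
    · have hl' : (h.getD 0 "" ≠ "?") = False := by
        simp only [ne_eq]; exact eq_false (not_not_intro hl)
      simp only [List.cons_append, NBRs, lastR, List.foldl_cons, hl', if_false]
      rw [ih]
      simp [lastR]
    · have hl' : (h.getD 0 "" ≠ "?") = True := by
        simp only [ne_eq]; exact eq_true hl
      simp only [List.cons_append, NBRs, lastR, List.foldl_cons, hl', if_true]
      rw [ih]
      simp [lastR]

lemma lastR_rev (t : List (List String)) :
    lastR t.reverse none = firstSrcF t none := by
  induction t with
  | nil => rfl
  | cons h t ih =>
    rw [List.reverse_cons, lastR, List.foldl_append]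
    simp only [List.foldl_cons, List.foldl_nil]
    rw [firstSrcF]
    by_cases hl : h.getD 0 "" = "?"
    · rw [if_neg (not_not_intro hl), if_neg (not_not_intro hl)]
      exact ih
    · rw [if_pos hl, if_pos hl]

lemma below_cons (h : List String) (t : List (List String)) :
    (NBRs (h :: t).reverse none).reverse
      = (if h.getD 0 "" ≠ "?" then some h else firstSrcF t none)
          :: (NBRs t.reverse none).reverse := by
  rw [List.reverse_cons, NBRs_append]
  simp only [NBRs, List.reverse_append, List.reverse_cons, List.reverse_nil]
  rw [lastR_rev]
  rfl

lemma firstSrcF_orElse (t : List (List String)) (prev : Option (List String)) :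
    firstSrcF t prev
      = match firstSrcF t none with | some p => some p | none => prev := by
  induction t with
  | nil => rfl
  | cons h t ih =>
    rw [firstSrcF, firstSrcF]
    by_cases hl : h.getD 0 "" = "?"
    · rw [if_neg (not_not_intro hl), if_neg (not_not_intro hl), ih]
    · rw [if_pos hl, if_pos hl]

lemma alt_main (g : List (List String)) (carry : Option (List String)) :
    ((g.zip ((NBRs g.reverse none).reverse)).zip (NBRs g carry)).map
      (fun t =>
        if t.1.1.getD 0 "" ≠ "?" then t.1.1
        else match t.1.2 with
          | some b => b
          | none => match t.2 with
            | some a => a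
            | none => t.1.1)
    = gridResF g carry := by
  induction g generalizing carry with
  | nil => rfl
  | cons h t ih =>
    rw [below_cons]
    rw [show NBRs (h :: t) carry
        = (if h.getD 0 "" ≠ "?" then some h else carry)
            :: NBRs t (if h.getD 0 "" ≠ "?" then some h else carry) from rfl]
    simp only [List.zip_cons_cons, List.map_cons]
    by_cases hl : h.getD 0 "" = "?"
    · have hl' : (h.getD 0 "" ≠ "?") = False := by
        simp only [ne_eq]; exact eq_false (not_not_intro hl)
      simp only [gridResF, hl', if_false]
      rw [ih carry]
      congr 1
      rw [firstSrcF_orElse t carry]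
      rcases h1 : firstSrcF t none with _ | p
      · rcases carry with _ | a <;> rfl
      · rfl
    · have hl' : (h.getD 0 "" ≠ "?") = True := by
        simp only [ne_eq]; exact eq_true hl
      simp only [gridResF, hl', if_true]
      rw [ih (some h)]

lemma alt_eq (karta : List (List String)) :
    fillCake_alt karta = gridResF (karta.map fillRowB) none := by
  simp only [fillCake_alt]
  rw [nearestRowBefore_eq, nearestRowBefore_eq]
  exact alt_main (karta.map fillRowB) none

-- bridge: the one-pass fill's letter flag vs the first-cell test

lemma fillB_snd_some_lettered (r : List String) (v : String)
    (h : (fillB_row r).2 = some v) : (fillB_row r).1.getD 0 "" ≠ "?" := by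
  rcases row_decomp r with hq | ⟨P, a, t, rfl, hP, ha⟩
  · rw [fillB_allq r hq] at h; simp at h
  · rw [fillB_decomp P a t hP ha]
    cases P with
    | nil => simpa using ha
    | cons p P' => simpa using ha

lemma fillB_snd_none_q (r : List String) (hne : r ≠ [])
    (h : (fillB_row r).2 = none) : (fillB_row r).1.getD 0 "" = "?" := by
  rcases row_decomp r with hq | ⟨P, a, t, hr, hP, ha⟩
  · rw [fillB_allq r hq]
    cases r with
    | nil => exact absurd rfl hne
    | cons c t => simpa using hq c (by simp)
  · subst hr
    rw [fillB_decomp P a t hP ha] at h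
    simp at h

-- the pending-list fold equals the symmetric-sweep grid result

lemma grid_main (rows : List (List String)) :
    ∀ (F : List (List String)) (pend : List Nat) (prev : Option (List String)),
    (∀ i ∈ pend, i < F.length) → (∀ r ∈ rows, r ≠ []) →
    (match (rows.foldl BstepG (F, pend, prev)).2.2 with
      | none => (rows.foldl BstepG (F, pend, prev)).1
      | some p => (rows.foldl BstepG (F, pend, prev)).2.1.foldl (fun f i => f.set i p)
          (rows.foldl BstepG (F, pend, prev)).1)
    = (match firstSrcF (rows.map (fun r => (fillB_row r).1)) prev with
        | none => F
        | some p => pend.foldl (fun f i => f.set i p) F)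
      ++ gridResF (rows.map (fun r => (fillB_row r).1)) prev := by
  induction rows with
  | nil =>
    intro F pend prev _ _
    rcases prev with _ | p <;> simp [firstSrcF, gridResF]
  | cons r rest ih =>
    intro F pend prev hb hne
    simp only [List.foldl_cons, List.map_cons]
    rcases h2 : (fillB_row r).2 with _ | v
    · -- all-'?' row: goes pending
      have hq : (fillB_row r).1.getD 0 "" = "?" :=
        fillB_snd_none_q r (hne r (by simp)) h2
      rw [show BstepG (F, pend, prev) r = (F ++ [(fillB_row r).1], pend ++ [F.length], prev) from by
        rw [BstepG]; simp only; rw [h2]]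
      rw [ih (F ++ [(fillB_row r).1]) (pend ++ [F.length]) prev
        (by intro i hi
            rcases List.mem_append.mp hi with h | h
            · have := hb i h; simp; omega
            · simp only [List.mem_singleton] at h; simp [h])
        (fun x hx => hne x (by simp [hx]))]
      rw [firstSrcF, if_neg (not_not_intro hq)]
      rw [gridResF, if_neg (not_not_intro hq)]
      rcases h1 : firstSrcF (rest.map (fun r => (fillB_row r).1)) prev with _ | p
      · simp
      · simp only []
        rw [List.foldl_append]
        simp only [List.foldl_cons, List.foldl_nil]
        rw [foldl_set_append _ _ _ _ hb]
        have hlenf : (pend.foldl (fun f i => f.set i p) F).length = F.length :=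
          length_foldl_set pend p F
        rw [show ((pend.foldl (fun f i => f.set i p) F) ++ [(fillB_row r).1]).set F.length p
            = (pend.foldl (fun f i => f.set i p) F) ++ [p] from by
          rw [← hlenf]; exact set_append_at _ _ [] p]
        simp
    · -- lettered row: pending flushed
      have hlet : (fillB_row r).1.getD 0 "" ≠ "?" :=
        fillB_snd_some_lettered r v h2
      rw [show BstepG (F, pend, prev) r
          = ((pend.foldl (fun f i => f.set i (fillB_row r).1) F) ++ [(fillB_row r).1],
              [], some (fillB_row r).1) from by
        rw [BstepG]; simp only; rw [h2]]
      rw [ih _ [] (some (fillB_row r).1) (by simp)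
        (fun x hx => hne x (by simp [hx]))]
      rw [firstSrcF, if_pos hlet]
      rw [gridResF, if_pos hlet]
      rcases h1 : firstSrcF (rest.map (fun r => (fillB_row r).1)) (some (fillB_row r).1)
          with _ | p <;> simp

lemma ref_eq (karta : List (List String)) (hne : ∀ r ∈ karta, r ≠ []) :
    refFill karta = gridResF (karta.map (fun r => (fillB_row r).1)) none := by
  have h := grid_main karta [] [] none (by simp) hne
  rw [refFill_eq_steps]
  rw [h]
  rcases firstSrcF (karta.map (fun r => (fillB_row r).1)) none with _ | p <;> simp

-- ===== VERDICT (by name: the statement is the Claim_ definition above) =====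
theorem fillCake_spec : Claim_equal_fillCake := by
  intro karta _ hpre
  show fillCake karta = fillCake_alt karta
  have hne : ∀ r ∈ karta, r ≠ [] := by
    intro r hr hnil
    have hlen := hpre.2.2.1 r hr
    rw [hnil] at hlen
    simp only [List.length_nil] at hlen
    have hc := hpre.2.1
    omega
  rw [fillCake_eq_ref karta hpre, ref_eq karta hne, alt_eq]
  congr 1
  exact List.map_congr_left (fun r _ => (fillRowB_eq r).symm)
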